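-- pv_equiv track=rewrite | github.com/gps035/aoc-2019 | passwords.py | has_strict_double
-- ===== SOURCE A (Python) =====
-- def has_strict_double(password: str):
--     current_duplicates = 1
--     for i in range(1, len(password)):
--         if password[i] != password[i - 1]:
--             if current_duplicates == 2:
--                 return True
--             current_duplicates = 0
--         current_duplicates += 1
--     return current_duplicates == 2
-- ===== SOURCE B (Python) =====
-- def has_strict_double(password: str):
--     # Split the string into maximal runs of equal characters; True iff some run has length exactly 2.
--     i, n = 0, len(password)
--     while i < n:
--         j = i
--         while j < n and password[j] == password[i]:
--             j += 1
--         if j - i == 2: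
--             return True
--         i = j
--     return False
-- ===== Notes on version B (the rewrite author's own statement) =====
-- stated objective: alternative
-- what changed: B decomposes the string into maximal runs of equal characters (an outer loop splitting off one run at a time) and tests each run length for exactly 2, instead of A's single pass with a reset-and-increment duplicate counter and early return.
import Mathlib
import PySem

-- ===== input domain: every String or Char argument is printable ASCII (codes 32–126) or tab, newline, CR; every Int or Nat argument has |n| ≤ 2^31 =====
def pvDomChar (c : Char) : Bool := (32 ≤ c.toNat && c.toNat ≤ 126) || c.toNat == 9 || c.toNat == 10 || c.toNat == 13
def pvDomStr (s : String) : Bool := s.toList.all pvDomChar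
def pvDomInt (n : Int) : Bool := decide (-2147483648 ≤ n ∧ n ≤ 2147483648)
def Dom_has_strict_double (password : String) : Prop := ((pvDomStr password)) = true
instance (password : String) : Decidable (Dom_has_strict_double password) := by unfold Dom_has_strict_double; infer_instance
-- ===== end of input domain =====

-- B splits the string into maximal runs of equal characters and tests each run length for
-- exactly 2, instead of A's single-pass reset-and-increment duplicate counter with early return.


-- ===== PORT A =====
-- A's loop over range(1, len) comparing password[i] with password[i-1] is transcribed as a
-- structural recursion carrying the previous character and the counter current_duplicates.
def hsdGoA (prev : Char) (dup : Int) : List Char → Bool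
  | [] => decide (dup = 2)                       -- return current_duplicates == 2
  | c :: rest =>
    if c ≠ prev then
      if dup = 2 then true                       -- early return True
      else hsdGoA c 1 rest                       -- current_duplicates = 0; then += 1
    else hsdGoA c (dup + 1) rest                 -- current_duplicates += 1

def has_strict_double (password : String) : Bool :=
  match password.toList with
  | [] => decide ((1 : Int) = 2)                 -- loop body never runs
  | c :: rest => hsdGoA c 1 rest

-- ===== PORT B =====
-- B's inner while (advance j while password[j] == password[i]) is the takeWhile/dropWhile on
-- the remaining characters; the outer while is the recursion on the remainder.
def hsdGoB : List Char → Bool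
  | [] => false
  | c :: rest =>
    if 1 + (rest.takeWhile (· == c)).length = 2 then true   -- j - i == 2
    else hsdGoB (rest.dropWhile (· == c))                   -- i = j
termination_by l => l.length
decreasing_by
  simpa using Nat.lt_succ_of_le (List.length_dropWhile_le (· == c) rest)

def has_strict_double_alt (password : String) : Bool :=
  hsdGoB password.toList

-- ===== PRECONDITION & SPEC =====
def Spec_has_strict_double (password : String) (out : Bool) : Prop := out = has_strict_double_alt password
instance (password : String) (out : Bool) : Decidable (Spec_has_strict_double password out) := by unfold Spec_has_strict_double; infer_instance

-- ===== CLAIM (what is proved, stated in full; the proofs are below) =====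
def Claim_equal_has_strict_double : Prop := ∀ (password : String), Dom_has_strict_double password → Spec_has_strict_double password (has_strict_double password)

-- ===== LEMMAS AND PROOFS =====

theorem hsdGoB_cons (c : Char) (rest : List Char) :
    hsdGoB (c :: rest) =
      (if 1 + (rest.takeWhile (· == c)).length = 2 then true
       else hsdGoB (rest.dropWhile (· == c))) := by
  rw [hsdGoB]

-- Invariant: with a run of `dup` copies of `prev` just consumed, A's counter loop returns true
-- iff that run (extended by the leading takeWhile) has length 2, or B succeeds on the rest.
theorem hsdGoA_eq (l : List Char) : ∀ (prev : Char) (dup : Int),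
    hsdGoA prev dup l =
      ((decide (dup + (l.takeWhile (· == prev)).length = 2)) || hsdGoB (l.dropWhile (· == prev))) := by
  induction l with
  | nil =>
    intro prev dup
    simp [hsdGoA, hsdGoB, List.takeWhile, List.dropWhile]
  | cons c rest ih =>
    intro prev dup
    by_cases h : c = prev
    · subst h
      simp only [hsdGoA, List.takeWhile_cons, List.dropWhile_cons, beq_self_eq_true, if_true,
        List.length_cons, ne_eq, not_true_eq_false, if_false]
      rw [ih c (dup + 1)]
      congr 2
      push_cast
      ring_nf
    · have hb : (c == prev) = false := by simp [h]
      simp only [hsdGoA, ne_eq, h, not_false_eq_true, if_true, List.takeWhile_cons, hb,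
        List.dropWhile_cons, Bool.false_eq_true, if_false, List.length_nil]
      rw [ih c 1, hsdGoB_cons]
      by_cases h2 : 1 + (rest.takeWhile (· == c)).length = 2
      · have h2' : ((1 : Int) + (rest.takeWhile (· == c)).length = 2) := by exact_mod_cast h2
        by_cases hd : dup = 2 <;> simp [hd, h2, h2']
      · have h2' : ¬ ((1 : Int) + (rest.takeWhile (· == c)).length = 2) := by exact_mod_cast h2
        by_cases hd : dup = 2 <;> simp [hd, h2, h2']

-- ===== VERDICT (by name: the statement is the Claim_ definition above) =====
theorem has_strict_double_spec : Claim_equal_has_strict_double := by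
  intro password _
  unfold Spec_has_strict_double has_strict_double has_strict_double_alt
  cases hl : password.toList with
  | nil => simp [hsdGoB]
  | cons c rest =>
    simp only []
    rw [hsdGoA_eq, hsdGoB_cons]
    by_cases h2 : 1 + (rest.takeWhile (· == c)).length = 2
    · have h2' : ((1 : Int) + (rest.takeWhile (· == c)).length = 2) := by exact_mod_cast h2
      simp [h2, h2']
    · have h2' : ¬ ((1 : Int) + (rest.takeWhile (· == c)).length = 2) := by exact_mod_cast h2
      simp [h2, h2']
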